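-- pv_equiv track=rewrite | github.com/Niyath1234/AnTiks | text_to_sql_app/multi_table_query_parser.py | _identify_ordering
-- ===== SOURCE A (Python) =====
-- from typing import Dict, List, Set, Tuple, Optional, Any
--
-- def _identify_ordering(query_lower: str) -> Optional[str]:
--     """Identify ORDER BY requirements"""
--     if 'ascending' in query_lower or 'asc' in query_lower:
--         return 'ASC'
--     if 'descending' in query_lower or 'desc' in query_lower:
--         return 'DESC'
--     if any(kw in query_lower for kw in ['top', 'highest', 'largest']):
--         return 'DESC'
--     if any(kw in query_lower for kw in ['lowest', 'smallest']):
--         return 'ASC'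
--     return None
-- ===== SOURCE B (Python) =====
-- from typing import Optional
--
-- def _identify_ordering(query_lower: str) -> Optional[str]:
--     """Identify ORDER BY requirements with a single scan over the string.
--
--     One pass over every position checks which ordering keywords start there,
--     accumulating four flags; the direction is then decided by priority.
--     'asc'/'desc' subsume 'ascending'/'descending', so two prefixes suffice
--     for the first two priority classes.
--     """
--     asc = desc = high = low = False
--     for i in range(len(query_lower)):
--         if query_lower.startswith('asc', i):
--             asc = True
--         if query_lower.startswith('desc', i):
--             desc = True
--         if query_lower.startswith(('top', 'highest', 'largest'), i):
--             high = True
--         if query_lower.startswith(('lowest', 'smallest'), i):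
--             low = True
--     if asc:
--         return 'ASC'
--     if desc:
--         return 'DESC'
--     if high:
--         return 'DESC'
--     if low:
--         return 'ASC'
--     return None
-- ===== Notes on version B (the rewrite author's own statement) =====
-- stated objective: alternative
-- what changed: B makes a single left-to-right scan over the string, testing at each position (startswith at offset i) which keyword starts there and accumulating four flags (exploiting that 'asc'/'desc' subsume 'ascending'/'descending'), then decides the direction by priority; A runs a separate substring search for each of nine keywords.
import Mathlib
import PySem

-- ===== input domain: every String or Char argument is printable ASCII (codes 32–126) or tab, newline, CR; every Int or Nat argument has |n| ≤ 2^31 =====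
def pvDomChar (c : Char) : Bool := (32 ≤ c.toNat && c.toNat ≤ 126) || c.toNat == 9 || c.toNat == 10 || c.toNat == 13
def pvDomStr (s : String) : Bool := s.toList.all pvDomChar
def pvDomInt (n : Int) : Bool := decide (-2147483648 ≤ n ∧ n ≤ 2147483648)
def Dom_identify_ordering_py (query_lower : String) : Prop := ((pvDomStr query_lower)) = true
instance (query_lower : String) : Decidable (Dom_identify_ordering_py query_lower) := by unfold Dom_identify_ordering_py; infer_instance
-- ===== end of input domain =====

-- B replaces A's nine separate substring searches by a single scan over the string positions that accumulates four keyword flags; objective: alternative.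


-- ===== PORT A =====
def identify_ordering_py (query_lower : String) : Option String :=
  if PySem.Str.isIn "ascending" query_lower || PySem.Str.isIn "asc" query_lower then
    some "ASC"
  else if PySem.Str.isIn "descending" query_lower || PySem.Str.isIn "desc" query_lower then
    some "DESC"
  else if ["top", "highest", "largest"].any (fun kw => PySem.Str.isIn kw query_lower) then
    some "DESC"
  else if ["lowest", "smallest"].any (fun kw => PySem.Str.isIn kw query_lower) then
    some "ASC"
  else
    none

-- ===== PORT B =====
-- single scan over the suffixes of the string, accumulating (asc, desc, high, low) flags
def scanFlags : List Char → Bool × Bool × Bool × Bool → Bool × Bool × Bool × Bool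
  | [], acc => acc
  | c :: rest, (a, d, h, l) =>
      let t := c :: rest
      scanFlags rest
        (a || "asc".toList.isPrefixOf t,
         d || "desc".toList.isPrefixOf t,
         h || "top".toList.isPrefixOf t || "highest".toList.isPrefixOf t || "largest".toList.isPrefixOf t,
         l || "lowest".toList.isPrefixOf t || "smallest".toList.isPrefixOf t)

def identify_ordering_py_alt (query_lower : String) : Option String :=
  match scanFlags query_lower.toList (false, false, false, false) with
  | (a, d, h, l) =>
    if a then some "ASC"
    else if d then some "DESC"
    else if h then some "DESC"
    else if l then some "ASC"
    else none

-- ===== PRECONDITION & SPEC =====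
def Spec_identify_ordering_py (query_lower : String) (out : Option String) : Prop := out = identify_ordering_py_alt query_lower
instance (query_lower : String) (out : Option String) : Decidable (Spec_identify_ordering_py query_lower out) := by unfold Spec_identify_ordering_py; infer_instance

-- ===== CLAIM =====
def Claim_equal_identify_ordering_py : Prop := ∀ (query_lower : String), Dom_identify_ordering_py query_lower → Spec_identify_ordering_py query_lower (identify_ordering_py query_lower)

-- ===== LEMMAS AND PROOFS =====

lemma scan_fst : ∀ (l : List Char) (a d h lo : Bool),
    ((scanFlags l (a, d, h, lo)).1 = true) ↔ (a = true ∨ "asc".toList <:+: l) := by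
  intro l
  induction l with
  | nil => intro a d h lo; simp [scanFlags]
  | cons c rest ih =>
      intro a d h lo
      simp only [scanFlags, ih, Bool.or_eq_true, List.isPrefixOf_iff_prefix,
        List.infix_cons_iff]
      tauto

lemma scan_snd : ∀ (l : List Char) (a d h lo : Bool),
    ((scanFlags l (a, d, h, lo)).2.1 = true) ↔ (d = true ∨ "desc".toList <:+: l) := by
  intro l
  induction l with
  | nil => intro a d h lo; simp [scanFlags]
  | cons c rest ih =>
      intro a d h lo
      simp only [scanFlags, ih, Bool.or_eq_true, List.isPrefixOf_iff_prefix,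
        List.infix_cons_iff]
      tauto

lemma scan_high : ∀ (l : List Char) (a d h lo : Bool),
    ((scanFlags l (a, d, h, lo)).2.2.1 = true) ↔
      (h = true ∨ "top".toList <:+: l ∨ "highest".toList <:+: l ∨ "largest".toList <:+: l) := by
  intro l
  induction l with
  | nil => intro a d h lo; simp [scanFlags]
  | cons c rest ih =>
      intro a d h lo
      simp only [scanFlags, ih, Bool.or_eq_true, List.isPrefixOf_iff_prefix,
        List.infix_cons_iff]
      tauto

lemma scan_low : ∀ (l : List Char) (a d h lo : Bool),
    ((scanFlags l (a, d, h, lo)).2.2.2 = true) ↔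
      (lo = true ∨ "lowest".toList <:+: l ∨ "smallest".toList <:+: l) := by
  intro l
  induction l with
  | nil => intro a d h lo; simp [scanFlags]
  | cons c rest ih =>
      intro a d h lo
      simp only [scanFlags, ih, Bool.or_eq_true, List.isPrefixOf_iff_prefix,
        List.infix_cons_iff]
      tauto

-- an infix of a string contains every infix of the keyword: used for 'asc' ⊑ 'ascending'
lemma infix_of_infix_of_prefix {kw big l : List Char} (h1 : kw <+: big) (h2 : big <:+: l) :
    kw <:+: l := h1.isInfix.trans h2

-- ===== VERDICT =====
theorem identify_ordering_py_spec : Claim_equal_identify_ordering_py := by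
  intro q _
  unfold Spec_identify_ordering_py identify_ordering_py identify_ordering_py_alt
  have hA := scan_fst q.toList false false false false
  have hD := scan_snd q.toList false false false false
  have hH := scan_high q.toList false false false false
  have hL := scan_low q.toList false false false false
  rcases hflags : scanFlags q.toList (false, false, false, false) with ⟨a, d, h, l⟩
  rw [hflags] at hA hD hH hL
  simp only [Bool.false_eq_true, false_or] at hA hD hH hL
  have pre1 : "asc".toList <+: "ascending".toList := by decide
  have pre2 : "desc".toList <+: "descending".toList := by decide
  have e1 : (PySem.Str.isIn "ascending" q || PySem.Str.isIn "asc" q) = a := by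
    rw [Bool.eq_iff_iff]
    simp only [Bool.or_eq_true, PySem.Str.isIn_iff_infix, hA]
    exact ⟨fun hc => hc.elim (fun hx => infix_of_infix_of_prefix pre1 hx) id, Or.inr⟩
  have e2 : (PySem.Str.isIn "descending" q || PySem.Str.isIn "desc" q) = d := by
    rw [Bool.eq_iff_iff]
    simp only [Bool.or_eq_true, PySem.Str.isIn_iff_infix, hD]
    exact ⟨fun hc => hc.elim (fun hx => infix_of_infix_of_prefix pre2 hx) id, Or.inr⟩
  have e3 : (["top", "highest", "largest"].any (fun kw => PySem.Str.isIn kw q)) = h := by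
    rw [Bool.eq_iff_iff]
    simp only [List.any_cons, List.any_nil, Bool.or_eq_true, Bool.false_eq_true,
      or_false, PySem.Str.isIn_iff_infix, hH]
  have e4 : (["lowest", "smallest"].any (fun kw => PySem.Str.isIn kw q)) = l := by
    rw [Bool.eq_iff_iff]
    simp only [List.any_cons, List.any_nil, Bool.or_eq_true, Bool.false_eq_true,
      or_false, PySem.Str.isIn_iff_infix, hL]
  rw [e1, e2, e3, e4]
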